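-- pv_equiv track=rewrite | github.com/yy642/Trumps-Tweets | feature_selection.py | find_word_freq
-- ===== SOURCE A (Python) =====
-- def find_word_freq(labels, alltokens):
-- 	'''
-- 	Build three dictionaries according to input labels and alltokens
--
-- 	INPUT:
-- 	labels           : size of N, a list of labels
-- 	alltokens        : size of N, N lists of tokenized and pre-processed tweets texts.
--
-- 	OUTPUT:
-- 	total_word_dict (key: 1/2 words appeared in all tweets, value: the frequency of the word in all tweets.)
-- 	pos_word_dict   (key: 1/2 words appeared in pos tweets, value: the frequency of the word in pos tweets.)
-- 	neg_word_dict   (key: 1/2 words appeared in neg tweets, value: the frequency of the word in neg tweets.)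
-- 	'''
--
-- 	assert len(labels) == len(alltokens) #input labels and texts must be the same length
-- 	total_word_dict = {}
-- 	pos_word_dict = {}
-- 	neg_word_dict = {}
--
-- 	N = len(labels)
-- 	for i in range(N):
-- 		tokens = alltokens[i]
-- 		d = len(tokens)
-- 		tokens = tokens[:-1]#skip the last element of the tokens (date and time)
--
-- #		if extractfeatures == 'two_word_bag':# convert to two-words token
-- #			tokens = twoword(tokens)
-- #		elif extractfeatures == 'one_and_two_word_bag':# one and two-words token
-- #			tokens = tokens + twoword(tokens)
--
-- 		#fill in the dictonary for the tokens
-- 		for token in tokens: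
-- 			if token in total_word_dict:
-- 				total_word_dict[token] += 1
-- 			else:
-- 				total_word_dict[token] = 1
--
-- 			if labels[i] == 1:
-- 				if token in pos_word_dict:
-- 					pos_word_dict[token] += 1
-- 				else:
-- 					pos_word_dict[token] = 1
-- 			else:
-- 				if token in neg_word_dict:
-- 					neg_word_dict[token] += 1
-- 				else:
-- 					neg_word_dict[token] = 1
--
-- 	return total_word_dict, pos_word_dict, neg_word_dict
-- ===== SOURCE B (Python) =====
-- def _count(token_lists):
--     """Frequency dict of all tokens in the given lists, in first-occurrence order."""
--     d = {}
--     for toks in token_lists: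
--         for t in toks:
--             d[t] = d.get(t, 0) + 1
--     return d
--
--
-- def find_word_freq(labels, alltokens):
--     assert len(labels) == len(alltokens)
--     stripped = [toks[:-1] for toks in alltokens]
--     pos = [s for l, s in zip(labels, stripped) if l == 1]
--     neg = [s for l, s in zip(labels, stripped) if l != 1]
--     return _count(stripped), _count(pos), _count(neg)
-- ===== Notes on version B (the rewrite author's own statement) =====
-- stated objective: simpler
-- what changed: B replaces A's single interleaved index loop that conditionally updates three dicts with a partition of the stripped token lists by label followed by three independent counting passes (a shared _count helper).
import Mathlib
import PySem

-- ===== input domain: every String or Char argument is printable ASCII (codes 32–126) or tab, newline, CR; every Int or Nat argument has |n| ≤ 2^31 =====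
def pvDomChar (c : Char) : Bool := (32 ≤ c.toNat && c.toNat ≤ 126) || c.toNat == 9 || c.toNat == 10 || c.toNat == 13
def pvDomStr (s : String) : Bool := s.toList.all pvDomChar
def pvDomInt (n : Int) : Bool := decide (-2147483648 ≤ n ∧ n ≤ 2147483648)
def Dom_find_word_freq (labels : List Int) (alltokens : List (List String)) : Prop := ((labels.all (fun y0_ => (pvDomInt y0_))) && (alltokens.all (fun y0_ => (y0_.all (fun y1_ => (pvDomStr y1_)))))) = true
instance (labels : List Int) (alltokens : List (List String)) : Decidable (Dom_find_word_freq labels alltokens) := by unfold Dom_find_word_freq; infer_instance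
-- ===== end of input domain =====

-- B partitions the stripped token lists by label and counts each stream in its own pass
-- (shared counting helper) instead of A's interleaved three-dict index loop; same results, not faster.

-- ===== PORT A =====
-- literal transliteration of A: index loop over range(N), conditional updates of three dicts
def find_word_freq (labels : List Int) (alltokens : List (List String)) : (List (String × Int)) × (List (String × Int)) × (List (String × Int)) :=
  let N : Int := labels.length
  let st :=
    (PySem.List.pyRange 0 N 1).foldl
      (fun (st : PySem.Dict String Int × PySem.Dict String Int × PySem.Dict String Int) i =>
        let tokens := PySem.List.pyGetD alltokens i []
        let tokens := PySem.List.slice tokens none (some (-1))   -- tokens[:-1]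
        tokens.foldl
          (fun st token =>
            let (t, p, n) := st
            let t := if t.contains token then t.insert token (t.getD token 0 + 1) else t.insert token 1
            if PySem.List.pyGetD labels i 0 == 1 then
              (t, (if p.contains token then p.insert token (p.getD token 0 + 1) else p.insert token 1), n)
            else
              (t, p, (if n.contains token then n.insert token (n.getD token 0 + 1) else n.insert token 1)))
          st)
      (PySem.Dict.empty, PySem.Dict.empty, PySem.Dict.empty)
  (st.1.items, st.2.1.items, st.2.2.items)

-- ===== PORT B =====
-- helper _count from Source B: frequency dict of all tokens in the given lists
def pvCount (tls : List (List String)) : PySem.Dict String Int :=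
  tls.foldl (fun d toks => toks.foldl (fun d t => d.insert t (d.getD t 0 + 1)) d) PySem.Dict.empty

def find_word_freq_alt (labels : List Int) (alltokens : List (List String)) : (List (String × Int)) × (List (String × Int)) × (List (String × Int)) :=
  let stripped := alltokens.map (fun toks => PySem.List.slice toks none (some (-1)))
  let pos := ((labels.zip stripped).filter (fun q => q.1 == 1)).map (fun q => q.2)
  let neg := ((labels.zip stripped).filter (fun q => !(q.1 == 1))).map (fun q => q.2)
  ((pvCount stripped).items, (pvCount pos).items, (pvCount neg).items)

-- ===== PRECONDITION & SPEC =====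
-- A asserts len(labels) == len(alltokens); on unequal lengths it raises AssertionError.
def Pre_find_word_freq (labels : List Int) (alltokens : List (List String)) : Prop :=
  labels.length = alltokens.length
instance (labels : List Int) (alltokens : List (List String)) : Decidable (Pre_find_word_freq labels alltokens) := by unfold Pre_find_word_freq; infer_instance

def pvWitness_find_word_freq : List Int × List (List String) :=
  ([1, 0], [["a", "b", "t1"], ["a", "t2"]])

def Spec_find_word_freq (labels : List Int) (alltokens : List (List String)) (out : (List (String × Int)) × (List (String × Int)) × (List (String × Int))) : Prop := out = find_word_freq_alt labels alltokens
instance (labels : List Int) (alltokens : List (List String)) (out : (List (String × Int)) × (List (String × Int)) × (List (String × Int))) : Decidable (Spec_find_word_freq labels alltokens out) := by unfold Spec_find_word_freq; infer_instance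

-- ===== CLAIM (what is proved, stated in full; the proofs are below) =====
def Claim_equal_find_word_freq : Prop := ∀ (labels : List Int) (alltokens : List (List String)), Dom_find_word_freq labels alltokens → Pre_find_word_freq labels alltokens → Spec_find_word_freq labels alltokens (find_word_freq labels alltokens)

-- ===== LEMMAS AND PROOFS =====

-- B's counting step; A's contains-branch computes the same dict
def pvStep (d : PySem.Dict String Int) (t : String) : PySem.Dict String Int :=
  d.insert t (d.getD t 0 + 1)

theorem pvStepA_eq (d : PySem.Dict String Int) (t : String) :
    (if d.contains t then d.insert t (d.getD t 0 + 1) else d.insert t 1) = pvStep d t := by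
  unfold pvStep
  by_cases h : d.contains t = true
  · simp [h]
  · simp only [Bool.not_eq_true] at h
    rw [if_neg (by simp [h]), PySem.Dict.getD_of_not_contains d (0 : Int) h]
    norm_num

-- A's inner token loop, with the label fixed
def pvInner (lab : Int) (st : PySem.Dict String Int × PySem.Dict String Int × PySem.Dict String Int)
    (toks : List String) : PySem.Dict String Int × PySem.Dict String Int × PySem.Dict String Int :=
  toks.foldl
    (fun st token =>
      let (t, p, n) := st
      let t := if t.contains token then t.insert token (t.getD token 0 + 1) else t.insert token 1
      if lab == 1 then
        (t, (if p.contains token then p.insert token (p.getD token 0 + 1) else p.insert token 1), n)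
      else
        (t, p, (if n.contains token then n.insert token (n.getD token 0 + 1) else n.insert token 1)))
    st

theorem pvInner_eq (lab : Int) (toks : List String) :
    ∀ t p n, pvInner lab (t, p, n) toks =
      (toks.foldl pvStep t,
       if lab == 1 then toks.foldl pvStep p else p,
       if lab == 1 then n else toks.foldl pvStep n) := by
  induction toks with
  | nil => intro t p n; simp [pvInner]
  | cons x xs ih =>
    intro t p n
    by_cases h : lab = 1
    · simp [pvInner, List.foldl_cons, h, pvStepA_eq] at ih ⊢
      exact ih (pvStep t x) (pvStep p x) n
    · simp [pvInner, List.foldl_cons, h, pvStepA_eq] at ih ⊢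
      exact ih (pvStep t x) p (pvStep n x)

-- counting a stream of token lists into an accumulator (pvCount from an arbitrary start)
def pvCountInto (d : PySem.Dict String Int) (tls : List (List String)) : PySem.Dict String Int :=
  tls.foldl (fun d toks => toks.foldl pvStep d) d

-- the zipped form of A's outer loop equals B's three independent counting passes
theorem pvMain (l : List (Int × List String)) :
    ∀ t p n,
      l.foldl (fun st q => pvInner q.1 st (PySem.List.slice q.2 none (some (-1)))) (t, p, n) =
        (pvCountInto t (l.map (fun q => PySem.List.slice q.2 none (some (-1)))),
         pvCountInto p ((l.filter (fun q => q.1 == 1)).map (fun q => PySem.List.slice q.2 none (some (-1)))),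
         pvCountInto n ((l.filter (fun q => !(q.1 == 1))).map (fun q => PySem.List.slice q.2 none (some (-1))))) := by
  induction l with
  | nil => intro t p n; simp [pvCountInto]
  | cons q rest ih =>
    intro t p n
    obtain ⟨lab, toks⟩ := q
    by_cases h : lab = 1
    · simp only [List.foldl_cons, pvInner_eq, h, List.filter_cons, beq_iff_eq]
      simp [ih, pvCountInto]
    · simp only [List.foldl_cons, pvInner_eq, List.filter_cons, beq_iff_eq]
      simp [h, ih, pvCountInto]

-- A's index loop over range(len(labels)) is the fold over the zipped pairs (lengths equal)
theorem pvRangeZip :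
    ∀ (la : List Int) (lb : List (List String)), la.length = lb.length →
    ∀ (init : PySem.Dict String Int × PySem.Dict String Int × PySem.Dict String Int),
      (List.range la.length).foldl
          (fun st k => pvInner (la.getD k 0) st (PySem.List.slice (lb.getD k []) none (some (-1)))) init =
        (la.zip lb).foldl (fun st q => pvInner q.1 st (PySem.List.slice q.2 none (some (-1)))) init := by
  intro la
  induction la with
  | nil => intro lb h init; simp
  | cons x xs ih =>
    intro lb h init
    cases lb with
    | nil => simp at h
    | cons y ys =>
      simp only [List.length_cons, List.range_succ_eq_map, List.foldl_cons, List.foldl_map,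
        List.getD_cons_zero, List.getD_cons_succ, List.zip_cons_cons]
      exact ih ys (by simpa using h) _

-- ===== VERDICT (by name: the statement is the Claim_ definition above) =====
theorem find_word_freq_spec : Claim_equal_find_word_freq := by
  intro labels alltokens _hdom hpre
  unfold Spec_find_word_freq
  have h0 : find_word_freq labels alltokens =
      (let st := (PySem.List.pyRange 0 (labels.length : Int) 1).foldl
          (fun st i => pvInner (PySem.List.pyGetD labels i 0) st
            (PySem.List.slice (PySem.List.pyGetD alltokens i []) none (some (-1))))
          (PySem.Dict.empty, PySem.Dict.empty, PySem.Dict.empty);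
        (st.1.items, st.2.1.items, st.2.2.items)) := rfl
  rw [h0]
  simp only [PySem.List.pyRange_zero_nat, List.foldl_map, PySem.List.pyGetD_natCast]
  rw [pvRangeZip labels alltokens hpre, pvMain]
  unfold find_word_freq_alt
  have hsnd : (labels.zip alltokens).map Prod.snd = alltokens :=
    List.map_snd_zip hpre.ge
  simp only [pvCount, pvCountInto, List.zip_map_right, List.filter_map, List.map_map,
    Function.comp_def, Prod.map_fst, Prod.map_snd, id_eq]
  have htot : (labels.zip alltokens).map (fun q => PySem.List.slice q.2 none (some (-1))) =
      alltokens.map (fun toks => PySem.List.slice toks none (some (-1))) := by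
    conv_rhs => rw [← hsnd, List.map_map]
    simp [Function.comp_def]
  rw [htot]
  rfl
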